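-- pv_equiv track=rewrite | github.com/dblhlx/PyBSASeq | PyBSASeq.py | sort_chrm
-- ===== SOURCE A (Python) =====
-- def sort_chrm(l):
--     a, b = [], []
--
--     for eml in l:
--         if eml.isdigit():
--             a.append(eml)
--         else:
--             b.append(eml)
--     a.sort(key=int)
--     b.sort()
--     a.extend(b)
--     return a
-- ===== SOURCE B (Python) =====
-- def sort_chrm(l):
--     return sorted(l, key=lambda s: (0, int(s)) if s.isdigit() else (1, s))
-- ===== Notes on version B (the rewrite author's own statement) =====
-- stated objective: simpler
-- what changed: Replaces the manual partition into two lists with two separate sorts and a concatenation by a single sorted() call with a composite (tag, value) key that places numeric labels (sorted as ints) before the rest (sorted as strings).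
import Mathlib
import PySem

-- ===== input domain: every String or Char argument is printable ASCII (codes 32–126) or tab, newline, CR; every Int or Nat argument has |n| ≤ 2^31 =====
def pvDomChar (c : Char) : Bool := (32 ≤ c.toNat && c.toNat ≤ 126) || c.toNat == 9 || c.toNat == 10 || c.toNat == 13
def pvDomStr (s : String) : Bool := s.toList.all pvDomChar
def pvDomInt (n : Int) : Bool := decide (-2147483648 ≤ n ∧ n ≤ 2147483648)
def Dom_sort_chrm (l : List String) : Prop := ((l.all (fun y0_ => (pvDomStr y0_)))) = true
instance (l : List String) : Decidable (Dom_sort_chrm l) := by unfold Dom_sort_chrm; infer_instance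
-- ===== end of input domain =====

-- B replaces A's partition-then-two-sorts with one sorted() call on a composite (tag, value) key; objective: simpler.
-- (int(s) on an isdigit ASCII string never raises, so the ports' total key '(ofStr? s).getD 0' is exact on Dom.)

-- ===== PORT A =====
-- key=int of a digit string; the getD 0 default is unreachable for ASCII digit strings
def pvIntKey (s : String) : Int := (PySem.Int.ofStr? s).getD 0

def sort_chrm (l : List String) : List String :=
  let ab := l.foldl
    (fun (acc : List String × List String) eml =>
      if PySem.Str.strIsdigit eml then (acc.1 ++ [eml], acc.2) else (acc.1, acc.2 ++ [eml]))
    ([], [])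
  let a := PySem.List.sorted ab.1 pvIntKey false   -- a.sort(key=int)
  let b := PySem.List.sorted ab.2 (fun s => s) false   -- b.sort()
  a ++ b

-- ===== PORT B =====
-- Source B's tuple key (0, int(s)) / (1, s) ported with PySem.List.sorted2 (tuple-key sort).
-- The heterogeneous second slot (int or str) is encoded in the single type List Int:
-- [int(s)] for a digit string, the list of character codes otherwise; across tags the slot is
-- never the deciding comparison, within a tag it is exactly int order resp. Python's
-- code-point string order — so this encoding is exact.
def pvTag (s : String) : Int := if PySem.Str.strIsdigit s then 0 else 1

def pvVal (s : String) : List Int :=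
  if PySem.Str.strIsdigit s then [(PySem.Int.ofStr? s).getD 0]
  else s.toList.map (fun c => (c.toNat : Int))

def sort_chrm_alt (l : List String) : List String :=
  PySem.List.sorted2 l pvTag pvVal false

-- ===== PRECONDITION & SPEC =====
def Spec_sort_chrm (l : List String) (out : List String) : Prop := out = sort_chrm_alt l
instance (l : List String) (out : List String) : Decidable (Spec_sort_chrm l out) := by unfold Spec_sort_chrm; infer_instance

-- ===== CLAIM (what is proved, stated in full; the proofs are below) =====
def Claim_equal_sort_chrm : Prop := ∀ (l : List String), Dom_sort_chrm l → Spec_sort_chrm l (sort_chrm l)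

-- ===== LEMMAS AND PROOFS =====

-- the comparison sorted2 sorts by
def pvBefore (a b : String) : Bool :=
  decide (pvTag a < pvTag b) || (!decide (pvTag b < pvTag a) && decide (pvVal a < pvVal b))

theorem pv_alt_eq_foldl (l : List String) :
    sort_chrm_alt l = l.foldl (fun acc x => PySem.List.insertBy pvBefore x acc) [] := rfl

-- A's partition loop is the pair of filters.
theorem pv_partition_loop (l : List String) (A B : List String) :
    l.foldl
      (fun (acc : List String × List String) eml =>
        if PySem.Str.strIsdigit eml then (acc.1 ++ [eml], acc.2) else (acc.1, acc.2 ++ [eml]))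
      (A, B)
    = (A ++ l.filter (fun s => PySem.Str.strIsdigit s),
       B ++ l.filter (fun s => !PySem.Str.strIsdigit s)) := by
  induction l generalizing A B with
  | nil => simp
  | cons x xs ih =>
    by_cases h : PySem.Str.strIsdigit x <;>
      simp only [List.foldl_cons, List.filter_cons, h, if_true, Bool.not_true, Bool.not_false,
        Bool.false_eq_true, if_false, ih, List.append_assoc, List.singleton_append]

-- inserting an element that sorts before all of B lands inside (or at the end of) A
theorem pv_insertBy_append_right {α : Type} (before : α → α → Bool) (x : α) :
    ∀ (A B : List α), (∀ b ∈ B, before x b = true) →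
    PySem.List.insertBy before x (A ++ B) = PySem.List.insertBy before x A ++ B := by
  intro A
  induction A with
  | nil =>
    intro B hB
    cases B with
    | nil => simp
    | cons b bs => simp [PySem.List.insertBy, hB b (by simp)]
  | cons a as ih =>
    intro B hB
    by_cases h : before x a <;> simp [PySem.List.insertBy, h, ih B hB]

-- inserting an element that sorts after all of A lands inside B
theorem pv_insertBy_append_left {α : Type} (before : α → α → Bool) (x : α) :
    ∀ (A B : List α), (∀ a ∈ A, before x a = false) →
    PySem.List.insertBy before x (A ++ B) = A ++ PySem.List.insertBy before x B := by
  intro A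
  induction A with
  | nil => intro B _; simp
  | cons a as ih =>
    intro B hA
    simp [PySem.List.insertBy, hA a (by simp), ih B (fun a' ha' => hA a' (by simp [ha']))]

-- insertBy only looks at 'before x ·' on the members of the accumulator
theorem pv_insertBy_congr {α : Type} (b1 b2 : α → α → Bool) (x : α) :
    ∀ (ys : List α), (∀ y ∈ ys, b1 x y = b2 x y) →
    PySem.List.insertBy b1 x ys = PySem.List.insertBy b2 x ys := by
  intro ys
  induction ys with
  | nil => intro _; rfl
  | cons y ys ih =>
    intro h
    have hy := h y (by simp)
    have ih' := ih (fun z hz => h z (by simp [hz]))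
    by_cases hb : b1 x y
    · have hb2 : b2 x y = true := by rw [← hy]; exact hb
      simp [PySem.List.insertBy, hb, hb2]
    · have hb2 : b2 x y = false := by rw [← hy]; simpa using hb
      simp [PySem.List.insertBy, hb, hb2, ih']

-- One-pass insertion sort with a comparison that puts every p-element before every ¬p-element
-- splits into independent insertion sorts of the two filtered halves.
theorem pv_foldl_split (before : String → String → Bool)
    (p : String → Bool)
    (hpq : ∀ x y, p x = true → p y = false → before x y = true)
    (hqp : ∀ x y, p x = false → p y = true → before x y = false) :
    ∀ (l A B : List String), (∀ a ∈ A, p a = true) → (∀ b ∈ B, p b = false) →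
    l.foldl (fun acc x => PySem.List.insertBy before x acc) (A ++ B)
    = (l.filter p).foldl (fun acc x => PySem.List.insertBy before x acc) A
      ++ (l.filter (fun s => !p s)).foldl (fun acc x => PySem.List.insertBy before x acc) B := by
  intro l
  induction l with
  | nil => intro A B _ _; simp
  | cons x xs ih =>
    intro A B hA hB
    by_cases hx : p x
    · have h1 : PySem.List.insertBy before x (A ++ B)
          = PySem.List.insertBy before x A ++ B :=
        pv_insertBy_append_right before x A B (fun b hb => hpq x b hx (hB b hb))
      have hA' : ∀ a ∈ PySem.List.insertBy before x A, p a = true := by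
        intro a ha
        rcases (PySem.List.mem_insertBy before x a A).1 ha with rfl | ha
        · exact hx
        · exact hA a ha
      simp only [List.foldl_cons, h1, List.filter_cons, hx]
      simpa using ih (PySem.List.insertBy before x A) B hA' hB
    · have hx' : p x = false := by simpa using hx
      have h1 : PySem.List.insertBy before x (A ++ B)
          = A ++ PySem.List.insertBy before x B :=
        pv_insertBy_append_left before x A B (fun a ha => hqp x a hx' (hA a ha))
      have hB' : ∀ b ∈ PySem.List.insertBy before x B, p b = false := by
        intro b hb
        rcases (PySem.List.mem_insertBy before x b B).1 hb with rfl | hb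
        · exact hx'
        · exact hB b hb
      simp only [List.foldl_cons, h1, List.filter_cons, hx']
      simpa [hx'] using ih A (PySem.List.insertBy before x B) hA hB'

-- comparisons agree on all inserted and accumulated elements ⇒ the sorts agree
theorem pv_foldl_ins_congr (b1 b2 : String → String → Bool)
    (q : String → Bool) (hagree : ∀ x y, q x = true → q y = true → b1 x y = b2 x y) :
    ∀ (xs A : List String), (∀ a ∈ A, q a = true) → (∀ x ∈ xs, q x = true) →
    xs.foldl (fun acc x => PySem.List.insertBy b1 x acc) A
    = xs.foldl (fun acc x => PySem.List.insertBy b2 x acc) A := by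
  intro xs
  induction xs with
  | nil => intro A _ _; rfl
  | cons x xs ih =>
    intro A hA hxs
    have hx : q x = true := hxs x (by simp)
    have h1 : PySem.List.insertBy b1 x A = PySem.List.insertBy b2 x A :=
      pv_insertBy_congr b1 b2 x A (fun y hy => hagree x y hx (hA y hy))
    have hA' : ∀ a ∈ PySem.List.insertBy b2 x A, q a = true := by
      intro a ha
      rcases (PySem.List.mem_insertBy b2 x a A).1 ha with rfl | ha
      · exact hx
      · exact hA a ha
    simp only [List.foldl_cons, h1]
    exact ih (PySem.List.insertBy b2 x A) hA' (fun y hy => hxs y (by simp [hy]))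

-- character codes order and determine the character
theorem pv_char_ltNat (c d : Char) : c.toNat < d.toNat ↔ c < d := by
  rw [Char.lt_def, UInt32.lt_iff_toNat_lt]; rfl

theorem pv_char_eqNat (c d : Char) : c.toNat = d.toNat ↔ c = d := by
  constructor
  · intro h; exact Char.ext (UInt32.toNat_inj.mp h)
  · rintro rfl; rfl

-- lexicographic order on code lists is string order
theorem pv_map_lt : ∀ (xs ys : List Char),
    (xs.map (fun c => (c.toNat : Int)) < ys.map (fun c => (c.toNat : Int))) ↔ xs < ys := by
  intro xs
  induction xs with
  | nil =>
    intro ys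
    cases ys with
    | nil => simp
    | cons y ys => simp [List.nil_lt_cons]
  | cons x xs ih =>
    intro ys
    cases ys with
    | nil => simp [List.not_lt_nil]
    | cons y ys => simp [List.cons_lt_cons_iff, ih, pv_char_eqNat, pv_char_ltNat]

-- pvBefore on the four tag combinations
theorem pv_keyB_dd (x y : String) (hx : PySem.Str.strIsdigit x = true)
    (hy : PySem.Str.strIsdigit y = true) :
    pvBefore x y = decide (pvIntKey x < pvIntKey y) := by
  simp only [pvBefore, pvTag, pvVal, pvIntKey, hx, hy, if_true]
  simp [List.cons_lt_cons_iff]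

theorem pv_keyB_ss (x y : String) (hx : PySem.Str.strIsdigit x = false)
    (hy : PySem.Str.strIsdigit y = false) :
    pvBefore x y = decide (x < y) := by
  simp only [pvBefore, pvTag, pvVal, hx, hy, Bool.false_eq_true, if_false]
  simp [pv_map_lt, String.lt_iff_toList_lt]

theorem pv_keyB_ds (x y : String) (hx : PySem.Str.strIsdigit x = true)
    (hy : PySem.Str.strIsdigit y = false) :
    pvBefore x y = true := by
  simp only [pvBefore, pvTag, hx, hy, if_true, Bool.false_eq_true, if_false]
  simp

theorem pv_keyB_sd (x y : String) (hx : PySem.Str.strIsdigit x = false)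
    (hy : PySem.Str.strIsdigit y = true) :
    pvBefore x y = false := by
  simp only [pvBefore, pvTag, hx, hy, if_true, Bool.false_eq_true, if_false]
  simp

-- ===== VERDICT (by name: the statement is the Claim_ definition above) =====
theorem sort_chrm_spec : Claim_equal_sort_chrm := by
  intro l _
  unfold Spec_sort_chrm sort_chrm
  rw [pv_alt_eq_foldl]
  simp only [pv_partition_loop l [] [], List.nil_append]
  set p : String → Bool := fun s => PySem.Str.strIsdigit s with hp
  have hsplit := pv_foldl_split pvBefore p
        (fun x y hx hy => pv_keyB_ds x y hx hy)
        (fun x y hx hy => pv_keyB_sd x y hx hy)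
        l [] [] (by simp) (by simp)
  simp only [List.nil_append] at hsplit
  rw [hsplit]
  rw [pv_foldl_ins_congr pvBefore
        (fun a b => decide (pvIntKey a < pvIntKey b)) p
        (fun x y hx hy => pv_keyB_dd x y hx hy)
        (l.filter p) [] (by simp) (by intro x hx; exact (List.mem_filter.1 hx).2)]
  rw [pv_foldl_ins_congr pvBefore
        (fun a b => decide (a < b)) (fun s => !p s)
        (fun x y hx hy => pv_keyB_ss x y (by simpa using hx) (by simpa using hy))
        (l.filter (fun s => !p s)) [] (by simp) (by intro x hx; exact (List.mem_filter.1 hx).2)]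
  rw [← PySem.List.sorted_eq_foldl_insertBy (l.filter p) pvIntKey,
      ← PySem.List.sorted_eq_foldl_insertBy (l.filter (fun s => !p s)) (fun s => s)]
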